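-- pv_equiv track=rewrite | github.com/gksgpals/make_yga | slide_formatter.py | remaining_visual_line_capacity
-- ===== SOURCE A (Python) =====
-- from typing import Any, List, Tuple
--
-- def remaining_visual_line_capacity(max_lines: int, used_lines: int) -> int:
--     remaining_markers: List[None] = []
--     used_markers: List[None] = []
--     for _ in range(max_lines):
--         if len(used_markers) < used_lines:
--             used_markers.append(None)
--         else:
--             remaining_markers.append(None)
--     return len(remaining_markers)
-- ===== SOURCE B (Python) =====
-- def remaining_visual_line_capacity(max_lines: int, used_lines: int) -> int:
--     cap = max(max_lines, 0)
--     return cap - min(cap, max(used_lines, 0))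
-- ===== Notes on version B (the rewrite author's own statement) =====
-- stated objective: faster
-- what changed: Replaced the O(max_lines) marker-list simulation with a closed-form arithmetic expression max(max_lines,0) - min(max(max_lines,0), max(used_lines,0)).
import Mathlib
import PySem

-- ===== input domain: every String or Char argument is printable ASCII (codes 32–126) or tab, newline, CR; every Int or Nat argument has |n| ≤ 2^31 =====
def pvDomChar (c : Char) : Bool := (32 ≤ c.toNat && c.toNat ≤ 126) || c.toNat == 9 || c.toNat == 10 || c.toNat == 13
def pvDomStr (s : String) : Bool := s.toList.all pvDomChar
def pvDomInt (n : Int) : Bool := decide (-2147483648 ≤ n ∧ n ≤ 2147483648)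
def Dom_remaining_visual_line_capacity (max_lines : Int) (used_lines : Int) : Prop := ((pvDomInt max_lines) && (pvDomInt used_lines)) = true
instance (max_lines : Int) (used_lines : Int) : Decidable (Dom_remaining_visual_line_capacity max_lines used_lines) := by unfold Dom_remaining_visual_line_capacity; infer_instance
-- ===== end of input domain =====

-- B replaces A's O(max_lines) marker-list loop with an O(1) closed-form arithmetic expression.


-- ===== PORT A =====
-- Port of A: fold over range(max_lines), maintaining the two marker lists.
def remaining_visual_line_capacity (max_lines : Int) (used_lines : Int) : Int :=
  let st := (PySem.List.pyRange 0 max_lines 1).foldl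
    (fun (s : List Unit × List Unit) _ =>
      if (s.2.length : Int) < used_lines then (s.1, () :: s.2) else (() :: s.1, s.2))
    ([], [])
  (st.1.length : Int)

-- ===== PORT B =====
-- B: closed-form arithmetic, no loop.
def remaining_visual_line_capacity_alt (max_lines : Int) (used_lines : Int) : Int :=
  let cap := max max_lines 0
  cap - min cap (max used_lines 0)

-- ===== PRECONDITION & SPEC =====
def Spec_remaining_visual_line_capacity (max_lines : Int) (used_lines : Int) (out : Int) : Prop := out = remaining_visual_line_capacity_alt max_lines used_lines
instance (max_lines : Int) (used_lines : Int) (out : Int) : Decidable (Spec_remaining_visual_line_capacity max_lines used_lines out) := by unfold Spec_remaining_visual_line_capacity; infer_instance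

-- ===== CLAIM (what is proved, stated in full; the proofs are below) =====
def Claim_equal_remaining_visual_line_capacity : Prop := ∀ (max_lines : Int) (used_lines : Int), Dom_remaining_visual_line_capacity max_lines used_lines → Spec_remaining_visual_line_capacity max_lines used_lines (remaining_visual_line_capacity max_lines used_lines)

-- ===== LEMMAS AND PROOFS =====

-- ===== VERDICT (by name: the statement is the Claim_ definition above) =====
-- Loop invariant: the final remaining-list length, in terms of the lengths of the
-- accumulator lists and the number of iterations still to do.
theorem pv_loop_len (used : Int) (l : List Int) (r u : List Unit) :
    ((l.foldl
      (fun (s : List Unit × List Unit) _ =>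
        if (s.2.length : Int) < used then (s.1, () :: s.2) else (() :: s.1, s.2))
      (r, u)).1.length : Int)
      = r.length + ((l.length : Int) - min (l.length : Int) (max 0 (used - u.length))) := by
  induction l generalizing r u with
  | nil => simp
  | cons a t ih =>
    simp only [List.foldl_cons, List.length_cons]
    by_cases h : (u.length : Int) < used
    · rw [if_pos h, ih]
      simp only [List.length_cons]
      push_cast
      omega
    · rw [if_neg h, ih]
      simp only [List.length_cons]
      push_cast
      omega

theorem remaining_visual_line_capacity_spec : Claim_equal_remaining_visual_line_capacity := by
  intro m u _
  show remaining_visual_line_capacity m u = remaining_visual_line_capacity_alt m u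
  unfold remaining_visual_line_capacity remaining_visual_line_capacity_alt
  simp only []
  rw [pv_loop_len]
  rw [PySem.List.length_pyRange_one]
  simp only [List.length_nil]
  omega
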